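-- pv_equiv track=rewrite | github.com/ll3360/energy_storage | service/pred_api.py | getPTankID
-- ===== SOURCE A (Python) =====
-- def getPTankID(x: list, sol_dict: dict) -> list:
--     """Get tank_id"""
--     r_x = [i - 1 for i in x]  # route里的点位id-1
--     result = []
--     for item in r_x:
--         for key, val in sol_dict.items():
--             if item in val:
--                 result.append('p' + str(key))
--             else:
--                 pass
--     return result
-- ===== SOURCE B (Python) =====
-- def getPTankID(x: list, sol_dict: dict) -> list:
--     """Get tank_id"""
--     # reverse index: point id -> list of keys (in dict order) whose value list contains it
--     idx = {}
--     for key, val in sol_dict.items():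
--         for v in dict.fromkeys(val):
--             idx[v] = idx.get(v, []) + [key]
--     return ['p' + str(k) for i in x for k in idx.get(i - 1, [])]
-- ===== Notes on version B (the rewrite author's own statement) =====
-- stated objective: faster
-- what changed: Instead of scanning every dict value list for every route point, B builds a reverse index point->keys once and answers each point by one dict lookup.
import Mathlib
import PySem

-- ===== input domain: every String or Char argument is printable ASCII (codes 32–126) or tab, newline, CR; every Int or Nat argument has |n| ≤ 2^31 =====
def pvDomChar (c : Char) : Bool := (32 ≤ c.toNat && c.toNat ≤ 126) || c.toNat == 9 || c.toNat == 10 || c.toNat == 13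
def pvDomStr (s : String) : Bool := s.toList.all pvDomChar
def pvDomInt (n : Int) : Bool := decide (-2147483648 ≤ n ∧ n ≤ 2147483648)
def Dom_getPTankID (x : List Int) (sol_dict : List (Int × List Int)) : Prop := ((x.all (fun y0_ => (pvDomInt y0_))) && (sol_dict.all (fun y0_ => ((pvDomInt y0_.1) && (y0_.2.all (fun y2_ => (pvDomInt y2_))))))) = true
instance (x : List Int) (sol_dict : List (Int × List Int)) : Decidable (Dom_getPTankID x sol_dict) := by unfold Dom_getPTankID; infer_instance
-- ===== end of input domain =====

-- B replaces A's per-point scan of all dict values by a reverse index (point -> keys) built once; objective: faster (asymptotic).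

-- ===== PORT A =====
def getPTankID (x : List Int) (sol_dict : List (Int × List Int)) : List String :=
  let r_x := x.map (fun i => i - 1)
  r_x.foldl (fun result item =>
    sol_dict.foldl (fun result kv =>
      if kv.2.contains item then result ++ ["p" ++ PySem.Int.toStr kv.1] else result) result) []

-- ===== PORT B =====
def getPTankID_alt (x : List Int) (sol_dict : List (Int × List Int)) : List String :=
  let idx : PySem.Dict Int (List Int) :=
    sol_dict.foldl (fun idx kv =>
      (PySem.List.dedup kv.2).foldl
        (fun idx v => PySem.Dict.modify idx v [] (fun l => l ++ [kv.1])) idx) PySem.Dict.empty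
  x.flatMap (fun i => (PySem.Dict.getD idx (i - 1) []).map (fun k => "p" ++ PySem.Int.toStr k))

-- ===== PRECONDITION & SPEC =====
def Spec_getPTankID (x : List Int) (sol_dict : List (Int × List Int)) (out : List String) : Prop := out = getPTankID_alt x sol_dict
instance (x : List Int) (sol_dict : List (Int × List Int)) (out : List String) : Decidable (Spec_getPTankID x sol_dict out) := by unfold Spec_getPTankID; infer_instance

-- ===== CLAIM (what is proved, stated in full; the proofs are below) =====
def Claim_equal_getPTankID : Prop := ∀ (x : List Int) (sol_dict : List (Int × List Int)), Dom_getPTankID x sol_dict → Spec_getPTankID x sol_dict (getPTankID x sol_dict)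

-- ===== LEMMAS AND PROOFS =====

-- Posting one key k at every point of a duplicate-free list l changes getD at v by [k] iff v ∈ l.
theorem pv_inner_idx (k : Int) : ∀ (l : List Int), l.Nodup → ∀ (d : PySem.Dict Int (List Int)) (v : Int),
    PySem.Dict.getD (l.foldl (fun d u => PySem.Dict.modify d u [] (fun s => s ++ [k])) d) v []
      = PySem.Dict.getD d v [] ++ (if v ∈ l then [k] else []) := by
  intro l
  induction l with
  | nil => intro _ d v; simp
  | cons u l ih =>
    intro hnd d v
    rcases List.nodup_cons.mp hnd with ⟨hu, hl⟩
    simp only [List.foldl_cons]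
    rw [ih hl, PySem.Dict.getD_modify]
    by_cases hv : v = u
    · subst hv
      simp [hu]
    · simp [hv, List.mem_cons]

-- The reverse index looked up at v yields exactly the keys (in order) whose value list contains v.
theorem pv_idx_getD : ∀ (sd : List (Int × List Int)) (d : PySem.Dict Int (List Int)) (v : Int),
    PySem.Dict.getD (sd.foldl (fun idx kv =>
        (PySem.List.dedup kv.2).foldl
          (fun idx u => PySem.Dict.modify idx u [] (fun s => s ++ [kv.1])) idx) d) v []
      = PySem.Dict.getD d v [] ++ (sd.filter (fun kv => kv.2.contains v)).map Prod.fst := by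
  intro sd
  induction sd with
  | nil => intro d v; simp
  | cons kv rest ih =>
    intro d v
    simp only [List.foldl_cons]
    rw [ih, pv_inner_idx kv.1 _ (PySem.List.nodup_dedup kv.2)]
    by_cases hv : v ∈ kv.2
    · simp [hv, List.append_assoc]
    · simp [hv]

-- A's nested loops compute, for each shifted point, the matching keys in dict order.
theorem pv_A_loop (sd : List (Int × List Int)) : ∀ (l : List Int) (acc : List String),
    l.foldl (fun result item =>
        sd.foldl (fun result kv =>
          if kv.2.contains item then result ++ ["p" ++ PySem.Int.toStr kv.1] else result) result) acc
      = acc ++ l.flatMap (fun item =>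
          (sd.filter (fun kv => kv.2.contains item)).map (fun kv => "p" ++ PySem.Int.toStr kv.1)) := by
  intro l
  induction l with
  | nil => intro acc; simp
  | cons item l ih =>
    intro acc
    simp only [List.foldl_cons, List.flatMap_cons]
    rw [ih, PySem.List.foldl_append_if, List.append_assoc]

-- ===== VERDICT (by name: the statement is the Claim_ definition above) =====
theorem getPTankID_spec : Claim_equal_getPTankID := by
  intro x sol_dict _
  unfold Spec_getPTankID getPTankID getPTankID_alt
  rw [pv_A_loop, List.nil_append, List.flatMap_map]
  refine List.flatMap_congr ?_  -- pointwise equality of the per-point lists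
  intro i _
  rw [pv_idx_getD, PySem.Dict.getD_empty, List.nil_append, List.map_map]
  rfl
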